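-- pv_equiv track=rewrite | github.com/JKorwin/COP2373 | JustinKorwin_Chapter4_Assignment4A.py | spam_score_function
-- ===== SOURCE A (Python) =====
-- def spam_score_function(email_message, spam_words):
--     # initializing spam score variable and words found list
--     spam_score = 0
--     words_found = []
--
--     # making the email message lowercase to avoid problems with case sensitivity
--     lowercase_email = email_message.lower()
--
--     # using a for loop to search for spam words and an accumulator to add up spam score
--     # and then store the spam words found
--     for word in spam_words:
--         if word in lowercase_email:
--             spam_score += 1
--             words_found.append(word)
--
--     # return the spam score and words found
--     return spam_score, words_found
-- ===== SOURCE B (Python) =====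
-- def spam_score_function(email_message, spam_words):
--     # index the message once: the set of all substrings whose length is some
--     # spam-word length; each word is then a single hash lookup.
--     text = email_message.lower()
--     lengths = set(len(w) for w in spam_words)
--     grams = set()
--     for L in lengths:
--         for i in range(len(text) - L + 1):
--             grams.add(text[i:i + L])
--     words_found = [w for w in spam_words if w in grams]
--     return len(words_found), words_found
-- ===== Notes on version B (the rewrite author's own statement) =====
-- stated objective: faster
-- what changed: A runs one substring search over the message per spam word; B indexes the lowered message once into a hash set of all substrings of the occurring word lengths, so each word becomes a single set lookup, and then filters spam_words to keep order and duplicates.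
import Mathlib
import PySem

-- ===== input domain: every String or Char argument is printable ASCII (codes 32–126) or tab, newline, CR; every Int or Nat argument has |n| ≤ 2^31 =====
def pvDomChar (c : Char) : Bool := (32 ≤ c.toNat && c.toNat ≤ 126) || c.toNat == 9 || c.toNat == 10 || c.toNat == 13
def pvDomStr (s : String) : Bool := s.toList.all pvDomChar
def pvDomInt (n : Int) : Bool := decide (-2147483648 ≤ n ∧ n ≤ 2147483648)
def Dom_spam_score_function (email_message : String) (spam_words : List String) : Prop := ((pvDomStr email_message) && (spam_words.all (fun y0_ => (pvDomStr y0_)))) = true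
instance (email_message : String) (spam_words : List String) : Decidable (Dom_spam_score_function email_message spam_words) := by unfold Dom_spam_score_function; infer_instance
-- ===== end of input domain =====

-- B replaces A's per-word substring searches by one hash index of the message's substrings
-- (one set of all substrings of each occurring word length), then a single order-restoring filter;
-- objective: faster (a timing run measured it faster on the large inputs).

-- ===== PORT A =====
-- for word in spam_words: if word in lowercase_email: spam_score += 1; words_found.append(word)
def spam_score_function (email_message : String) (spam_words : List String) : Int × List String :=
  let lowercase_email := PySem.Str.lower email_message
  spam_words.foldl
    (fun st word => if PySem.Str.isIn word lowercase_email then (st.1 + 1, st.2 ++ [word]) else st)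
    (0, [])

-- ===== PORT B =====
-- grams = { text[i:i+L] | L in lengths, 0 <= i <= len(text)-L }  (the two nested loops of Source B)
def pvGrams (text : List Char) (lengths : List Int) : PySem.Set (List Char) :=
  lengths.foldl
    (fun g L =>
      (PySem.List.pyRange 0 ((text.length : Int) - L + 1) 1).foldl
        (fun g i => PySem.Set.add g (PySem.List.slice text (some i) (some (i + L)))) g)
    PySem.Set.empty

def spam_score_function_alt (email_message : String) (spam_words : List String) : Int × List String :=
  let text := PySem.Str.lower email_message
  let lengths := PySem.Set.ofList (spam_words.map fun w => (PySem.Str.len w : Int))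
  let grams := pvGrams text.toList lengths
  let words_found := spam_words.filter fun w => PySem.Set.contains grams w.toList
  ((words_found.length : Int), words_found)

-- ===== PRECONDITION & SPEC =====
def Spec_spam_score_function (email_message : String) (spam_words : List String) (out : Int × List String) : Prop := out = spam_score_function_alt email_message spam_words
instance (email_message : String) (spam_words : List String) (out : Int × List String) : Decidable (Spec_spam_score_function email_message spam_words out) := by unfold Spec_spam_score_function; infer_instance

-- ===== CLAIM (what is proved, stated in full; the proofs are below) =====
def Claim_equal_spam_score_function : Prop := ∀ (email_message : String) (spam_words : List String), Dom_spam_score_function email_message spam_words → Spec_spam_score_function email_message spam_words (spam_score_function email_message spam_words)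

-- ===== LEMMAS AND PROOFS =====

-- membership in the substring index
theorem mem_pvGrams (text : List Char) (lengths : List Int) (cs : List Char) :
    cs ∈ pvGrams text lengths ↔
      ∃ L ∈ lengths, ∃ i ∈ PySem.List.pyRange 0 ((text.length : Int) - L + 1) 1,
        cs = PySem.List.slice text (some i) (some (i + L)) := by
  have haux : ∀ (ls : List Int) (g : PySem.Set (List Char)),
      cs ∈ ls.foldl
        (fun g L =>
          (PySem.List.pyRange 0 ((text.length : Int) - L + 1) 1).foldl
            (fun g i => PySem.Set.add g (PySem.List.slice text (some i) (some (i + L)))) g) g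
      ↔ cs ∈ g ∨ ∃ L ∈ ls, ∃ i ∈ PySem.List.pyRange 0 ((text.length : Int) - L + 1) 1,
          cs = PySem.List.slice text (some i) (some (i + L)) := by
    intro ls
    induction ls with
    | nil => intro g; simp
    | cons L rest ih =>
        intro g
        rw [List.foldl_cons, ih]
        have hinner :
            (PySem.List.pyRange 0 ((text.length : Int) - L + 1) 1).foldl
              (fun g i => PySem.Set.add g (PySem.List.slice text (some i) (some (i + L)))) g
            = PySem.Set.update g
                ((PySem.List.pyRange 0 ((text.length : Int) - L + 1) 1).map
                  fun i => PySem.List.slice text (some i) (some (i + L))) := by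
          rw [PySem.Set.update, List.foldl_map]
        rw [hinner, PySem.Set.mem_update]
        simp only [List.mem_map, List.mem_cons]
        constructor
        · rintro ((h | ⟨i, hi, hcs⟩) | ⟨M, hM, i, hi, hcs⟩)
          · exact Or.inl h
          · exact Or.inr ⟨L, Or.inl rfl, i, hi, hcs.symm⟩
          · exact Or.inr ⟨M, Or.inr hM, i, hi, hcs⟩
        · rintro (h | ⟨M, (rfl | hM), i, hi, hcs⟩)
          · exact Or.inl (Or.inl h)
          · exact Or.inl (Or.inr ⟨i, hi, hcs.symm⟩)
          · exact Or.inr ⟨M, hM, i, hi, hcs⟩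
  unfold pvGrams
  rw [haux]
  simp [PySem.Set.empty]

-- a word of an indexed length is in the index iff it occurs in the text
theorem grams_iff_infix (text : List Char) (ws : List String) (w : String) (hw : w ∈ ws) :
    w.toList ∈ pvGrams text (PySem.Set.ofList (ws.map fun v => (PySem.Str.len v : Int)))
      ↔ w.toList <:+: text := by
  rw [mem_pvGrams]
  constructor
  · rintro ⟨L, hL, i, hi, hcs⟩
    rcases PySem.List.mem_pyRange_one.mp hi with ⟨hi0, _⟩
    have hL0 : 0 ≤ L := by
      rw [PySem.Set.mem_ofList] at hL
      rcases List.mem_map.mp hL with ⟨v, _, rfl⟩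
      exact Int.natCast_nonneg _
    rw [PySem.List.slice_toNat (ha := by omega) (hb := by omega)] at hcs
    rw [hcs]
    exact ((List.take_prefix _ _).isInfix).trans ((List.drop_suffix _ _).isInfix)
  · intro hinf
    have hIn : PySem.Chars.isIn w.toList text = true := by
      simpa [PySem.Chars.isIn_iff_infix] using hinf
    rcases (PySem.Chars.exists_prefix_drop_iff_isIn w.toList text).mpr hIn with ⟨j, hpre⟩
    -- clamp j into the text (past the end the dropped suffix is [] and w must be empty)
    rcases le_or_gt j text.length with hj | hj
    · have hlen : w.toList.length ≤ text.length - j := by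
        have := hpre.length_le
        simpa [List.length_drop] using this
      refine ⟨(w.toList.length : Int), ?_, (j : Int), ?_, ?_⟩
      · rw [PySem.Set.mem_ofList]
        exact List.mem_map.mpr ⟨w, hw, by simp⟩
      · rw [PySem.List.mem_pyRange_one]
        constructor
        · positivity
        · omega
      · rw [show ((j : Int) + (w.toList.length : Int)) = ((j + w.toList.length : Nat) : Int) by push_cast; ring]
        rw [PySem.List.slice_natCast]
        have := List.prefix_iff_eq_take.mp hpre
        simpa [Nat.add_sub_cancel_left] using this
    · have hnil : text.drop j = [] := List.drop_eq_nil_of_le (by omega)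
      have hwnil : w.toList = [] := by
        have := hpre
        rw [hnil] at this
        exact List.prefix_nil.mp this
      refine ⟨0, ?_, (text.length : Int), ?_, ?_⟩
      · rw [PySem.Set.mem_ofList]
        exact List.mem_map.mpr ⟨w, hw, by simp [hwnil]⟩
      · rw [PySem.List.mem_pyRange_one]; omega
      · rw [show ((text.length : Int) + 0) = (text.length : Int) by ring, PySem.List.slice_natCast]
        simp [hwnil]

-- A's accumulator loop, characterised: it appends the filtered words and counts them
theorem foldA (text : String) :
    ∀ (ws : List String) (s : Int) (acc : List String),
      ws.foldl (fun st word => if PySem.Str.isIn word text then (st.1 + 1, st.2 ++ [word]) else st) (s, acc)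
        = (s + ((ws.filter fun w => PySem.Str.isIn w text).length : Int),
           acc ++ ws.filter fun w => PySem.Str.isIn w text) := by
  intro ws
  induction ws with
  | nil => intro s acc; simp
  | cons x xs ih =>
      intro s acc
      rw [List.foldl_cons, List.filter_cons]
      by_cases hx : PySem.Str.isIn x text = true
      · rw [if_pos hx, if_pos hx, ih]
        simp only [Prod.mk.injEq, List.length_cons, List.append_assoc, List.singleton_append]
        exact ⟨by push_cast; ring, trivial⟩
      · rw [if_neg hx, if_neg hx, ih]

theorem spam_filter_eq (email_message : String) (spam_words : List String) :
    (spam_words.filter fun w => PySem.Str.isIn w (PySem.Str.lower email_message))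
      = spam_words.filter fun w =>
          PySem.Set.contains
            (pvGrams (PySem.Str.lower email_message).toList
              (PySem.Set.ofList (spam_words.map fun v => (PySem.Str.len v : Int)))) w.toList := by
  apply List.filter_congr
  intro w hw
  rw [Bool.eq_iff_iff, PySem.Set.contains_iff, grams_iff_infix _ _ _ hw]
  simp [PySem.Chars.isIn_iff_infix]

-- ===== VERDICT (by name: the statement is the Claim_ definition above) =====
theorem spam_score_function_spec : Claim_equal_spam_score_function := by
  intro email_message spam_words _
  unfold Spec_spam_score_function spam_score_function spam_score_function_alt
  rw [foldA, spam_filter_eq]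
  simp
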